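-- pv_equiv track=rewrite | github.com/rinoale/react-vite | backend/lib/line_merge.py | detect_gap_outlier
-- ===== SOURCE A (Python) =====
-- def detect_gap_outlier(active_items):
--     """Find where a vertical gap outlier starts, scanning from the bottom.
--
--     Args:
--         active_items: [(orig_index, bounds_dict), ...] pre-filtered active items.
--                       Each bounds_dict must have 'y' and 'height'.
--
--     Returns:
--         Position in active_items where the outlier starts, or None.
--     """
--     if len(active_items) < 2:
--         return None
--
--     gaps = []
--     for k in range(1, len(active_items)):
--         prev_b = active_items[k - 1][1]
--         cur_b = active_items[k][1]
--         gap = cur_b.get('y', 0) - (prev_b.get('y', 0) + prev_b.get('height', 0))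
--         gaps.append((k, gap))
--
--     sorted_gaps = sorted(g for _, g in gaps)
--     median_gap = sorted_gaps[len(sorted_gaps) // 2]
--     threshold = max(median_gap * 2, median_gap + 4)
--
--     for k, gap in reversed(gaps):
--         if gap >= threshold:
--             return k
--     return None
-- ===== SOURCE B (Python) =====
-- def _select(xs, i):
--     """i-th smallest of xs (0-based) by quickselect with first-element pivot."""
--     pivot = xs[0]
--     lo = [x for x in xs if x < pivot]
--     if i < len(lo):
--         return _select(lo, i)
--     eq = len([x for x in xs if x == pivot])
--     if i < len(lo) + eq:
--         return pivot
--     return _select([x for x in xs if x > pivot], i - len(lo) - eq)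
--
--
-- def detect_gap_outlier(active_items):
--     """Find where a vertical gap outlier starts, scanning forward and keeping the last hit."""
--     if len(active_items) < 2:
--         return None
--     gaps = [
--         cur[1].get('y', 0) - (prev[1].get('y', 0) + prev[1].get('height', 0))
--         for prev, cur in zip(active_items, active_items[1:])
--     ]
--     median = _select(gaps, len(gaps) // 2)
--     threshold = max(median * 2, median + 4)
--     best = None
--     for idx, gap in enumerate(gaps):
--         if gap >= threshold:
--             best = idx + 1
--     return best
-- ===== Notes on version B (the rewrite author's own statement) =====
-- stated objective: alternative
-- what changed: Replaces the full sort used only to read the median gap by a deterministic quickselect (selection by recursive three-way partition), and replaces the reversed early-return scan by a single forward pass that keeps the last index whose gap reaches the threshold.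
import Mathlib
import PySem

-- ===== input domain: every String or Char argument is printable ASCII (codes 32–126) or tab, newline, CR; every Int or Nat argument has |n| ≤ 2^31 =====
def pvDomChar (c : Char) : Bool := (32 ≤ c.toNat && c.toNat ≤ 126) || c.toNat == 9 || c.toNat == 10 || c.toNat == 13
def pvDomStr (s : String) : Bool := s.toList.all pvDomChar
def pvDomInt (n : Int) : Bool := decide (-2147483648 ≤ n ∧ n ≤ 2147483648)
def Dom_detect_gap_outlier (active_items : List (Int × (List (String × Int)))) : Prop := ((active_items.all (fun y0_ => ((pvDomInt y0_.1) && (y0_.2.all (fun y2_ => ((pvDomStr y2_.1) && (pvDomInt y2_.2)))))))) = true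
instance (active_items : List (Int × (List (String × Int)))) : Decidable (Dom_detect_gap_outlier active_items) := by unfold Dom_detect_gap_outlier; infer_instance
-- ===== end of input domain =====

-- B replaces the full sort (used only to read the median gap) by a deterministic quickselect and
-- the reversed early-return scan by one forward pass keeping the last hit; objective: alternative.

-- ===== PORT A =====
-- bounds.get(key, 0): first-match lookup in the association list (Python dict)
def pvDGet (b : List (String × Int)) (k : String) : Int := PySem.Dict.getD ⟨b⟩ k 0

def detect_gap_outlier (active_items : List (Int × (List (String × Int)))) : Option Int :=
  if active_items.length < 2 then none
  else
    -- for k in range(1, len(active_items)): gaps.append((k, gap)); the pyGetD default is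
    -- unreachable (1 ≤ k < len, so both indices are in range — Python never raises here)
    let gaps : List (Int × Int) :=
      (PySem.List.pyRange 1 (PySem.List.len active_items) 1).foldl
        (fun acc k =>
          let prev_b := (PySem.List.pyGetD active_items (k - 1) (0, [])).2
          let cur_b := (PySem.List.pyGetD active_items k (0, [])).2
          acc ++ [(k, pvDGet cur_b "y" - (pvDGet prev_b "y" + pvDGet prev_b "height"))]) []
    let sorted_gaps := PySem.List.sorted (gaps.map (·.2)) (fun x => x) false
    -- sorted_gaps[len(sorted_gaps) // 2]; the default is unreachable (gaps is nonempty)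
    let median_gap := PySem.List.pyGetD sorted_gaps
        (PySem.Int.floordiv (PySem.List.len sorted_gaps) 2) 0
    let threshold := max (median_gap * 2) (median_gap + 4)
    -- for k, gap in reversed(gaps): if gap >= threshold: return k
    (gaps.reverse.find? (fun kg => decide (threshold ≤ kg.2))).map (·.1)

-- ===== PORT B =====
-- _select(xs, i): i-th smallest by quickselect, first-element pivot ([] unreachable: Python raises)
def pvSelect : List Int → Nat → Int
  | [], _ => 0
  | pivot :: rest, i =>
    let lo := (pivot :: rest).filter (fun x => decide (x < pivot))
    if i < lo.length then pvSelect lo i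
    else
      let eq := ((pivot :: rest).filter (fun x => decide (x = pivot))).length
      if i < lo.length + eq then pivot
      else pvSelect ((pivot :: rest).filter (fun x => decide (pivot < x))) (i - lo.length - eq)
termination_by xs _ => xs.length
decreasing_by
  · simp only [List.filter_cons, decide_eq_true_eq, lt_self_iff_false, if_false,
      List.length_cons]
    have := List.length_filter_le (fun x => decide (x < pivot)) rest
    omega
  · simp only [List.filter_cons, decide_eq_true_eq, lt_self_iff_false, if_false,
      List.length_cons]
    have := List.length_filter_le (fun x => decide (pivot < x)) rest
    omega

def detect_gap_outlier_alt (active_items : List (Int × (List (String × Int)))) : Option Int :=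
  if active_items.length < 2 then none
  else
    -- [gap for prev, cur in zip(active_items, active_items[1:])]  (xs[1:] = drop 1)
    let gaps : List Int :=
      (active_items.zip (active_items.drop 1)).map
        (fun pc => pvDGet pc.2.2 "y" - (pvDGet pc.1.2 "y" + pvDGet pc.1.2 "height"))
    let median := pvSelect gaps (gaps.length / 2)
    let threshold := max (median * 2) (median + 4)
    -- for idx, gap in enumerate(gaps): if gap >= threshold: best = idx + 1
    (PySem.List.enumerate gaps 0).foldl
      (fun best ig => if threshold ≤ ig.2 then some (ig.1 + 1) else best) none

-- ===== PRECONDITION & SPEC =====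
def Spec_detect_gap_outlier (active_items : List (Int × (List (String × Int)))) (out : Option Int) : Prop := out = detect_gap_outlier_alt active_items
instance (active_items : List (Int × (List (String × Int)))) (out : Option Int) : Decidable (Spec_detect_gap_outlier active_items out) := by unfold Spec_detect_gap_outlier; infer_instance

-- ===== CLAIM (what is proved, stated in full; the proofs are below) =====
def Claim_equal_detect_gap_outlier : Prop := ∀ (active_items : List (Int × (List (String × Int)))), Dom_detect_gap_outlier active_items → Spec_detect_gap_outlier active_items (detect_gap_outlier active_items)

-- ===== LEMMAS AND PROOFS =====

-- a sorted list splits at p into its < p part and its >= p part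
lemma pv_sorted_split (p : Int) :
    ∀ ys : List Int, ys.Pairwise (· ≤ ·) →
      ys = ys.filter (fun x => decide (x < p)) ++ ys.filter (fun x => decide (p ≤ x)) := by
  intro ys
  induction ys with
  | nil => simp
  | cons y t ih =>
    intro hp
    rw [List.pairwise_cons] at hp
    obtain ⟨hy, ht⟩ := hp
    by_cases h : y < p
    · simp [h, show ¬ p ≤ y by omega]
      exact ih ht
    · have h1 : t.filter (fun x => decide (x < p)) = [] := by
        rw [List.filter_eq_nil_iff]
        intro z hz
        have := hy z hz
        simp only [decide_eq_true_eq]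
        omega
      have h2 : t.filter (fun x => decide (p ≤ x)) = t := by
        rw [List.filter_eq_self]
        intro z hz
        have := hy z hz
        simp only [decide_eq_true_eq]
        omega
      simp [h, h1, h2, show p ≤ y by omega]

-- quickselect on xs returns the i-th element of any sorted rearrangement of xs
lemma pv_select_spec_aux(n : Nat) :
    ∀ (xs ys : List Int), xs.length ≤ n → ys.Perm xs → ys.Pairwise (· ≤ ·) →
      ∀ i, i < xs.length → pvSelect xs i = ys.getD i 0 := by
  induction n with
  | zero => intro xs ys h _ _ i hi; omega
  | succ n ih =>
    intro xs ys hn hperm hsort i hi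
    match xs with
    | [] => simp at hi
    | p :: rest =>
      -- the three blocks of ys
      set L := ys.filter (fun x => decide (x < p)) with hL
      set E := (ys.filter (fun x => decide (p ≤ x))).filter (fun x => decide (x < p + 1)) with hE
      set H := (ys.filter (fun x => decide (p ≤ x))).filter (fun x => decide (p + 1 ≤ x)) with hH
      have hsortM : (ys.filter (fun x => decide (p ≤ x))).Pairwise (· ≤ ·) :=
        List.Pairwise.filter _ hsort
      have hdecomp : ys = L ++ E ++ H := by
        rw [List.append_assoc, ← pv_sorted_split (p+1) _ hsortM]
        exact pv_sorted_split p ys hsort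
      have hEeq : E = ys.filter (fun x => decide (x = p)) := by
        rw [hE, List.filter_filter]
        apply List.filter_congr
        intro x _
        rw [Bool.eq_iff_iff]
        simp only [Bool.and_eq_true, decide_eq_true_eq]
        omega
      have hHeq : H = ys.filter (fun x => decide (p < x)) := by
        rw [hH, List.filter_filter]
        apply List.filter_congr
        intro x _
        rw [Bool.eq_iff_iff]
        simp only [Bool.and_eq_true, decide_eq_true_eq]
        omega
      have hLperm : L.Perm ((p :: rest).filter (fun x => decide (x < p))) := hperm.filter _
      have hEperm : E.Perm ((p :: rest).filter (fun x => decide (x = p))) := by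
        rw [hEeq]; exact hperm.filter _
      have hHperm : H.Perm ((p :: rest).filter (fun x => decide (p < x))) := by
        rw [hHeq]; exact hperm.filter _
      have hLlen := hLperm.length_eq
      have hElen := hEperm.length_eq
      have hHlen := hHperm.length_eq
      have hyslen : ys.length = (p :: rest).length := hperm.length_eq
      have htotal : L.length + E.length + H.length = ys.length := by
        rw [hdecomp]; simp; omega
      have hLsort : L.Pairwise (· ≤ ·) := List.Pairwise.filter _ hsort
      have hHsort : H.Pairwise (· ≤ ·) := by
        rw [hHeq]; exact List.Pairwise.filter _ hsort
      -- sizes of the sublists strictly shrink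
      have hlolt : ((p :: rest).filter (fun x => decide (x < p))).length ≤ n := by
        simp only [List.filter_cons, decide_eq_true_eq, lt_self_iff_false, if_false] at *
        have := List.length_filter_le (fun x => decide (x < p)) rest
        simp at hn ⊢; omega
      have hhilt : ((p :: rest).filter (fun x => decide (p < x))).length ≤ n := by
        simp only [List.filter_cons, decide_eq_true_eq, lt_self_iff_false, if_false] at *
        have := List.length_filter_le (fun x => decide (p < x)) rest
        simp at hn ⊢; omega
      rw [pvSelect]
      simp only []
      split_ifs with h1 h2
      · -- recurse on lo
        rw [ih _ L hlolt hLperm hLsort i (by omega)]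
        rw [hdecomp, List.append_assoc, List.getD_append L (E ++ H) 0 i (by omega)]
      · -- pivot block
        rw [hdecomp, List.append_assoc,
          List.getD_append_right L (E ++ H) 0 i (by omega),
          List.getD_append E H 0 (i - L.length) (by omega)]
        have hmem : E.getD (i - L.length) 0 ∈ E := by
          rw [List.getD_eq_getElem E 0 (by omega)]
          exact List.getElem_mem _
        rw [hEeq] at hmem
        have := List.of_mem_filter hmem
        simp only [decide_eq_true_eq] at this
        rw [hEeq]
        exact this.symm
      · -- recurse on hi
        rw [ih _ H hhilt hHperm hHsort _ (by omega)]
        rw [hdecomp, List.append_assoc,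
          List.getD_append_right L (E ++ H) 0 i (by omega),
          List.getD_append_right E H 0 (i - L.length) (by omega)]
        congr 1
        omega

lemma pv_enumerate_shift (G : List Int) :
    ∀ s : Int, PySem.List.enumerate G (s + 1) = (PySem.List.enumerate G s).map (fun p => (p.1 + 1, p.2)) := by
  induction G with
  | nil => intro s; simp [PySem.List.enumerate_nil]
  | cons x t ih =>
    intro s
    rw [PySem.List.enumerate_cons, PySem.List.enumerate_cons, List.map_cons, ← ih (s + 1)]

lemma pv_last_hit (t : Int) :
    ∀ (l : List (Int × Int)) (init : Option Int),
      l.foldl (fun best ig => if t ≤ ig.2 then some (ig.1 + 1) else best) init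
        = match l.reverse.find? (fun kg => decide (t ≤ kg.2)) with
          | some kg => some (kg.1 + 1)
          | none => init := by
  intro l
  induction l with
  | nil => intro init; simp
  | cons x xs ih =>
    intro init
    rw [List.foldl_cons, ih, List.reverse_cons, List.find?_append]
    by_cases h : t ≤ x.2
    · cases hf : xs.reverse.find? (fun kg => decide (t ≤ kg.2))
      · simp [h]
      · simp [h]
    · cases hf : xs.reverse.find? (fun kg => decide (t ≤ kg.2))
      · simp [h]
      · simp [h]

-- A's indexed gap loop builds exactly enumerate-from-1 of B's zip-built gap values
lemma pv_gaps_eq(items : List (Int × (List (String × Int)))) :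
    (PySem.List.pyRange 1 (PySem.List.len items) 1).foldl
        (fun acc k =>
          let prev_b := (PySem.List.pyGetD items (k - 1) (0, [])).2
          let cur_b := (PySem.List.pyGetD items k (0, [])).2
          acc ++ [(k, pvDGet cur_b "y" - (pvDGet prev_b "y" + pvDGet prev_b "height"))]) []
      = PySem.List.enumerate
          ((items.zip (items.drop 1)).map
            (fun pc => pvDGet pc.2.2 "y" - (pvDGet pc.1.2 "y" + pvDGet pc.1.2 "height"))) 1 := by
  rw [PySem.List.foldl_append_singleton_eq_map
    (f := fun k => ((k : Int), pvDGet (PySem.List.pyGetD items k (0, [])).2 "y" -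
      (pvDGet (PySem.List.pyGetD items (k-1) (0, [])).2 "y" +
       pvDGet (PySem.List.pyGetD items (k-1) (0, [])).2 "height")))]
  rw [List.nil_append]
  apply List.ext_getElem
  · simp [PySem.List.length_pyRange_one, PySem.List.length_enumerate, PySem.List.len]
  · intro j h1 h2
    have hlen : (PySem.List.pyRange 1 (PySem.List.len items) 1).length = items.length - 1 := by
      simp [PySem.List.length_pyRange_one, PySem.List.len]
    rw [List.getElem_map] at *
    rw [PySem.List.getElem_pyRange_one _ _ j (by simpa using h1)]
    rw [PySem.List.getElem_enumerate _ _ j (by simpa using h2)]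
    have hj1 : (1 : Int) + (j : Int) = ((j + 1 : Nat) : Int) := by push_cast; ring
    have hjlt : j + 1 < items.length := by
      rw [List.length_map, hlen] at h1; omega
    rw [hj1]
    have hj0 : ((j + 1 : Nat) : Int) - 1 = ((j : Nat) : Int) := by push_cast; ring
    rw [hj0, PySem.List.pyGetD_natCast, PySem.List.pyGetD_natCast]
    rw [List.getElem_map, List.getElem_zip]
    rw [List.getD_eq_getElem items _ (by omega), List.getD_eq_getElem items _ (by omega)]
    have hdrop : (List.drop 1 items)[j]'(by simp; omega) = items[j + 1]'(by omega) := by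
      rw [List.getElem_drop]
      congr 1
      omega
    simp only [hdrop]

-- ===== VERDICT (by name: the statement is the Claim_ definition above) =====
theorem detect_gap_outlier_spec : Claim_equal_detect_gap_outlier := by
  intro items _
  unfold Spec_detect_gap_outlier detect_gap_outlier detect_gap_outlier_alt
  by_cases hlen : items.length < 2
  · simp [hlen]
  · simp only [hlen, if_false]
    rw [pv_gaps_eq items]
    set G : List Int := (items.zip (items.drop 1)).map
        (fun pc => pvDGet pc.2.2 "y" - (pvDGet pc.1.2 "y" + pvDGet pc.1.2 "height")) with hG
    have hGlen : G.length = items.length - 1 := by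
      simp [hG]
    have hGpos : 0 < G.length := by omega
    set S : List Int := PySem.List.sorted G (fun x => x) false with hS
    have hSlen : S.length = G.length := (PySem.List.sorted_perm G _ _).length_eq
    -- the two medians agree
    have hmap : (PySem.List.enumerate G 1).map (·.2) = G := PySem.List.map_snd_enumerate G 1
    rw [hmap]
    have hmed : PySem.List.pyGetD S (PySem.Int.floordiv (PySem.List.len S) 2) 0
        = pvSelect G (G.length / 2) := by
      have hfd : PySem.Int.floordiv (PySem.List.len S) 2 = ((S.length / 2 : Nat) : Int) := by
        have := PySem.Int.floordiv_natCast S.length 2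
        simp only [PySem.List.len] at this ⊢
        exact_mod_cast this
      rw [hfd, PySem.List.pyGetD_natCast]
      rw [pv_select_spec_aux G.length G S (le_refl _) (PySem.List.sorted_perm G _ _)
        (PySem.List.sorted_pairwise G _) (G.length / 2) (by omega)]
      rw [hSlen]
    rw [hmed]
    set t : Int := max (pvSelect G (G.length / 2) * 2) (pvSelect G (G.length / 2) + 4) with ht
    -- the two scans agree
    have hshift : PySem.List.enumerate G 1 = (PySem.List.enumerate G 0).map (fun p => (p.1 + 1, p.2)) := by
      have := pv_enumerate_shift G 0
      simp at this
      exact this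
    rw [hshift, ← List.map_reverse, List.find?_map, pv_last_hit]
    cases hf : (PySem.List.enumerate G 0).reverse.find?
        (fun kg => decide (t ≤ ((fun p => (p.1 + 1, p.2)) kg).2)) with
    | none =>
      have : (PySem.List.enumerate G 0).reverse.find? (fun kg => decide (t ≤ kg.2)) = none := by
        simpa using hf
      simp [Function.comp_def, this]
    | some kg =>
      have : (PySem.List.enumerate G 0).reverse.find? (fun kg => decide (t ≤ kg.2)) = some kg := by
        simpa using hf
      simp [Function.comp_def, this]
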